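-- pv_equiv track=rewrite | github.com/tidylobster/page-rank | compress.py | _packing
-- ===== SOURCE A (Python) =====
-- def _packing(matrix):
--     response = []
--     counter = 0
--     for i in range(len(matrix)):
--         s = sum(matrix[i])
--         if s == 0:
--             response.append(counter)
--             continue
--         for j in range(len(matrix[i])):
--             if matrix[i][j] != 0:
--                 response.append(counter)
--                 break
--         counter += s
--     response.append(counter)
--     return response
-- ===== SOURCE B (Python) =====
-- def _packing(matrix):
--     # Build the row-pointer list BACK-TO-FRONT: start from the last boundary
--     # and, for each row taken from the end, prepend a 0 and shift every
--     # already-built pointer up by that row's sum.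
--     out = [0]
--     for row in reversed(matrix):
--         s = sum(row)
--         out = [0] + [s + x for x in out]
--     return out
-- ===== Notes on version B (the rewrite author's own statement) =====
-- stated objective: alternative
-- what changed: Builds the pointer list back-to-front: iterating the rows in reverse, it prepends a 0 and shifts all already-built pointers up by the row's sum, instead of A's forward accumulating loop with an inner nonzero scan; over integer rows shifting by a zero row sum is a no-op, matching A's skip.
import Mathlib
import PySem

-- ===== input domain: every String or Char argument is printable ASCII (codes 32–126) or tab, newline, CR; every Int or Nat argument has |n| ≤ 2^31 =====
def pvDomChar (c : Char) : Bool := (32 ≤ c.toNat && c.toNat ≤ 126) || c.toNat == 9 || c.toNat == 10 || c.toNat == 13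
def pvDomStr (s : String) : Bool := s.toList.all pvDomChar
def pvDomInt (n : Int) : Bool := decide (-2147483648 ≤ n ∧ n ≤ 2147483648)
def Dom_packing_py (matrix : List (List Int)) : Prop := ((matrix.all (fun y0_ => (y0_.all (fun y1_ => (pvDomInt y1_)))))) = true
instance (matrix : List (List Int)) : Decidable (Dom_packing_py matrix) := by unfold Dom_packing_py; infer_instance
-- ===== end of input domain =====

-- B builds the pointer list back-to-front (prepend 0, shift prior pointers by the row sum) instead of A's forward loop with inner nonzero scan (objective: alternative).


-- ===== PORT A =====
-- inner 'for j … : if matrix[i][j] != 0: response.append(counter); break'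
def packingInner (row : List Int) (resp : List Int) (counter : Int) : List Int :=
  match row with
  | [] => resp
  | x :: xs => if x ≠ 0 then resp ++ [counter] else packingInner xs resp counter

def packingStep (p : List Int × Int) (row : List Int) : List Int × Int :=
  let s := row.foldl (· + ·) 0          -- s = sum(matrix[i])
  if s = 0 then (p.1 ++ [p.2], p.2)     -- append counter; continue
  else (packingInner row p.1 p.2, p.2 + s)

def packing_py (matrix : List (List Int)) : List Int :=
  let r := matrix.foldl packingStep ([], 0)
  r.1 ++ [r.2]

-- ===== PORT B =====
-- 'for row in reversed(matrix): out = [0] + [s + x for x in out]' = foldr over the rows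
def packing_py_alt (matrix : List (List Int)) : List Int :=
  matrix.foldr (fun row out => 0 :: out.map (fun x => row.foldl (· + ·) 0 + x)) [0]

-- ===== PRECONDITION & SPEC =====
def Spec_packing_py (matrix : List (List Int)) (out : List Int) : Prop := out = packing_py_alt matrix
instance (matrix : List (List Int)) (out : List Int) : Decidable (Spec_packing_py matrix out) := by unfold Spec_packing_py; infer_instance

-- ===== CLAIM (what is proved, stated in full; the proofs are below) =====
def Claim_equal_packing_py : Prop := ∀ (matrix : List (List Int)), Dom_packing_py matrix → Spec_packing_py matrix (packing_py matrix)

-- ===== LEMMAS AND PROOFS =====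
theorem foldl_add_zero_of_all_zero (row : List Int) (a : Int)
    (h : ∀ x ∈ row, x = 0) : row.foldl (· + ·) a = a := by
  induction row generalizing a with
  | nil => rfl
  | cons x xs ih =>
      have hx := h x (by simp)
      simp only [List.foldl_cons, hx, add_zero]
      exact ih a (fun y hy => h y (by simp [hy]))

theorem packingInner_eq (row : List Int) (resp : List Int) (c : Int)
    (h : ∃ x ∈ row, x ≠ 0) : packingInner row resp c = resp ++ [c] := by
  induction row with
  | nil => simp at h
  | cons x xs ih =>
      by_cases hx : x = 0
      · obtain ⟨y, hy, hyne⟩ := h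
        rcases List.mem_cons.mp hy with h1 | h1
        · exact absurd hx (h1 ▸ hyne)
        · simp [packingInner, hx]
          exact ih ⟨y, h1, hyne⟩
      · simp [packingInner, hx]

theorem packing_main (matrix : List (List Int)) (resp : List Int) (c : Int) :
    (matrix.foldl packingStep (resp, c)).1 ++ [(matrix.foldl packingStep (resp, c)).2]
      = resp ++ (packing_py_alt matrix).map (fun x => c + x) := by
  induction matrix generalizing resp c with
  | nil => simp [packing_py_alt]
  | cons row rest ih =>
      simp only [List.foldl_cons]
      by_cases hs : row.foldl (· + ·) 0 = 0
      · have hstep : packingStep (resp, c) row = (resp ++ [c], c) := by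
          simp [packingStep, hs]
        rw [hstep, ih]
        simp [packing_py_alt, hs]
      · have hex : ∃ x ∈ row, x ≠ 0 := by
          by_contra h
          push Not at h
          exact hs (foldl_add_zero_of_all_zero row 0 h)
        have hstep : packingStep (resp, c) row = (resp ++ [c], c + row.foldl (· + ·) 0) := by
          simp [packingStep, hs, packingInner_eq row resp c hex]
        rw [hstep, ih]
        simp [packing_py_alt, List.map_map]

-- ===== VERDICT (by name: the statement is the Claim_ definition above) =====
theorem packing_py_spec : Claim_equal_packing_py := by
  intro matrix _
  unfold Spec_packing_py packing_py
  simpa using packing_main matrix [] 0
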